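-- pv_equiv track=rewrite | github.com/echeadle/building-ai-agents | chapter-16-prompt-chaining-concept/code/quality_gates.py | validate_all_items_addressed
-- ===== SOURCE A (Python) =====
-- def validate_all_items_addressed(
--     input_items: list[str],
--     output_text: str,
--     case_sensitive: bool = False
-- ) -> tuple[bool, str]:
--     """
--     Validate that all input items appear in the output.
--
--     Useful for ensuring nothing was dropped during processing.
--
--     Args:
--         input_items: List of items that should appear in output
--         output_text: The text to check
--         case_sensitive: Whether matching should be case-sensitive
--
--     Returns:
--         Tuple of (is_valid, error_message)
--     """
--     search_text = output_text if case_sensitive else output_text.lower()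
--
--     missing = []
--     for item in input_items:
--         search_item = item if case_sensitive else item.lower()
--         if search_item not in search_text:
--             missing.append(item)
--
--     if missing:
--         return False, f"Missing items in output: {missing}"
--
--     return True, ""
-- ===== SOURCE B (Python) =====
-- def validate_all_items_addressed(
--     input_items: list[str],
--     output_text: str,
--     case_sensitive: bool = False
-- ) -> tuple[bool, str]:
--     """Text-major scan: one sweep over the text's anchor positions, marking
--     every pattern that starts there, instead of one substring search per item."""
--     t = output_text if case_sensitive else output_text.lower()
--     pats = input_items if case_sensitive else [it.lower() for it in input_items]
--     hit = [False] * len(pats)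
--     for i in range(len(t) + 1):
--         hit = [h or t.startswith(p, i) for p, h in zip(pats, hit)]
--     missing = [it for it, h in zip(input_items, hit) if not h]
--     if missing:
--         return False, f"Missing items in output: {missing}"
--     return True, ""
-- ===== Notes on version B (the rewrite author's own statement) =====
-- stated objective: alternative
-- what changed: A does one independent substring search per input item (item-major); B does a single text-major sweep over the text's anchor positions, marking every pattern that starts at each position in one boolean flag vector, then collects the unmarked items.
import Mathlib
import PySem

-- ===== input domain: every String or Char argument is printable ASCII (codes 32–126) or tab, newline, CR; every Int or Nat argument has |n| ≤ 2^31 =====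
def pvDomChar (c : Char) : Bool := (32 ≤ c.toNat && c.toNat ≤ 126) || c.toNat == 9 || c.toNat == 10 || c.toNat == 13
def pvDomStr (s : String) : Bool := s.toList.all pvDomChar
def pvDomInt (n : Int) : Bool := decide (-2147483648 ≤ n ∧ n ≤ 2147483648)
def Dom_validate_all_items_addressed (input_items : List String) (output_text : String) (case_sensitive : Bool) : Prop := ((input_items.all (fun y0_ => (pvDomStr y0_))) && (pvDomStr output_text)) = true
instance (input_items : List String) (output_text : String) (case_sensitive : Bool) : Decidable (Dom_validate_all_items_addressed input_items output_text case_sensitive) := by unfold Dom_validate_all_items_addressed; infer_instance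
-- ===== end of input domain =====

-- B replaces A's item-major loop (one substring search per item) by a text-major sweep over
-- the text's anchor positions that marks every pattern starting there (objective: alternative).

-- Shared helper: Python's f"{missing}" (repr of a list of str), exact on the printable-ASCII
-- + tab/newline/CR domain: repr escapes '\\', the chosen quote, '\t', '\n', '\r'.
def pyReprCharQ (q c : Char) : List Char :=
  if c = '\\' then ['\\', '\\']
  else if c = q then ['\\', q]
  else if c = Char.ofNat 9 then ['\\', 't']
  else if c = Char.ofNat 10 then ['\\', 'n']
  else if c = Char.ofNat 13 then ['\\', 'r']
  else [c]

-- Python str repr: single quotes unless the string contains ' and no "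
def pyReprStr (s : String) : List Char :=
  let cs := s.toList
  let q : Char := if cs.contains '\'' && !(cs.contains '\"') then '\"' else '\''
  (q :: cs.flatMap (pyReprCharQ q)) ++ [q]

def pyMissingMsg (missing : List String) : String :=
  String.ofList ("Missing items in output: [".toList ++
    PySem.Chars.join (", ".toList) (missing.map pyReprStr) ++ [']'])

-- ===== PORT A =====
def validate_all_items_addressed (input_items : List String) (output_text : String) (case_sensitive : Bool) : Bool × String :=
  let search_text := if case_sensitive then output_text else PySem.Str.lower output_text
  let missing := input_items.foldl (fun acc item =>
    let search_item := if case_sensitive then item else PySem.Str.lower item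
    if !(PySem.Str.isIn search_item search_text) then acc ++ [item] else acc) []
  if missing ≠ [] then (false, pyMissingMsg missing) else (true, "")

-- ===== PORT B =====
def validate_all_items_addressed_alt (input_items : List String) (output_text : String) (case_sensitive : Bool) : Bool × String :=
  let t := if case_sensitive then output_text else PySem.Str.lower output_text
  let pats := if case_sensitive then input_items else input_items.map PySem.Str.lower
  let hit0 := List.replicate pats.length false
  -- t.startswith(p, i) is 'p is a prefix of t[i:]' — exact for the 0 ≤ i ≤ len(t) scanned here
  let hit := (PySem.List.pyRange 0 (PySem.Str.len t + 1) 1).foldl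
    (fun hit i => List.zipWith (fun p h => h || PySem.Chars.startswith (t.toList.drop i.toNat) p.toList) pats hit) hit0
  let missing := ((input_items.zip hit).filter (fun q => !q.2)).map (·.1)
  if missing ≠ [] then (false, pyMissingMsg missing) else (true, "")

-- ===== PRECONDITION & SPEC =====
def Spec_validate_all_items_addressed (input_items : List String) (output_text : String) (case_sensitive : Bool) (out : Bool × String) : Prop := out = validate_all_items_addressed_alt input_items output_text case_sensitive
instance (input_items : List String) (output_text : String) (case_sensitive : Bool) (out : Bool × String) : Decidable (Spec_validate_all_items_addressed input_items output_text case_sensitive out) := by unfold Spec_validate_all_items_addressed; infer_instance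

-- ===== CLAIM (what is proved, stated in full; the proofs are below) =====
def Claim_equal_validate_all_items_addressed : Prop := ∀ (input_items : List String) (output_text : String) (case_sensitive : Bool), Dom_validate_all_items_addressed input_items output_text case_sensitive → Spec_validate_all_items_addressed input_items output_text case_sensitive (validate_all_items_addressed input_items output_text case_sensitive)

-- ===== LEMMAS AND PROOFS =====

-- One zipWith step over a state that is a map of pats is again a map of pats.
theorem zipWith_or_map (pats : List String) (g : String → Bool) (f : String → Bool) :
    List.zipWith (fun p h => h || f p) pats (pats.map g) = pats.map (fun p => g p || f p) := by
  induction pats with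
  | nil => rfl
  | cons p ps ih => simp [ih]

-- Folding the per-position marking over any list of positions: each pattern's flag ends up
-- 'initial flag OR some position in the list anchors the pattern'.
theorem foldl_hit (pats : List String) (tl : List Char) (L : List Int) (g : String → Bool) :
    L.foldl (fun hit i => List.zipWith
        (fun p h => h || PySem.Chars.startswith (tl.drop i.toNat) p.toList) pats hit) (pats.map g)
      = pats.map (fun p => g p || L.any (fun i => PySem.Chars.startswith (tl.drop i.toNat) p.toList)) := by
  induction L generalizing g with
  | nil => simp
  | cons i L ih =>
    rw [List.foldl_cons, zipWith_or_map, ih]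
    simp [Bool.or_assoc]

-- Some anchor position in 0..len(tl) works  ↔  p is a substring of tl.
theorem any_range_eq_isIn (p tl : List Char) :
    ((PySem.List.pyRange 0 ((tl.length : Int) + 1) 1).any
        (fun i => PySem.Chars.startswith (tl.drop i.toNat) p)) = PySem.Chars.isIn p tl := by
  rw [Bool.eq_iff_iff, List.any_eq_true]
  constructor
  · rintro ⟨i, _, hsw⟩
    exact (PySem.Chars.exists_prefix_drop_iff_isIn p tl).mp
      ⟨i.toNat, (PySem.Chars.startswith_iff _ _).mp hsw⟩
  · intro h
    obtain ⟨j, hj⟩ := (PySem.Chars.exists_prefix_drop_iff_isIn p tl).mpr h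
    refine ⟨(min j tl.length : Nat), ?_, ?_⟩
    · rw [PySem.List.mem_pyRange_one]
      constructor <;> [positivity; exact_mod_cast by omega]
    · rw [PySem.Chars.startswith_iff, Int.toNat_natCast]
      rcases le_total j tl.length with hle | hle
      · rwa [min_eq_left hle]
      · rw [min_eq_right hle, List.drop_eq_nil_of_le le_rfl]
        rwa [List.drop_eq_nil_of_le hle] at hj

-- Keep-if-flag-unset on a zip of a list with its per-element flags is a filter.
theorem zip_filter_map_fst (xs : List String) (g : String → Bool) :
    ((xs.zip (xs.map g)).filter (fun q => !q.2)).map (·.1) = xs.filter (fun x => !g x) := by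
  induction xs with
  | nil => rfl
  | cons x xs ih =>
    by_cases h : g x <;> simp [h, ih]

-- The two ways of collecting the missing items coincide, for any per-item normalisation patf.
theorem missing_core (input_items : List String) (st : String) (patf : String → String) :
    ((input_items.zip ((PySem.List.pyRange 0 ((st.toList.length : Int) + 1) 1).foldl
        (fun hit i => List.zipWith
          (fun p h => h || PySem.Chars.startswith (st.toList.drop i.toNat) p.toList)
          (input_items.map patf) hit)
        (List.replicate (input_items.map patf).length false))).filter (fun q => !q.2)).map (·.1)
      = input_items.foldl (fun acc item =>
          if !(PySem.Str.isIn (patf item) st) then acc ++ [item] else acc) [] := by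
  have hrep : List.replicate (input_items.map patf).length false
      = (input_items.map patf).map (fun _ => false) := by
    simp
  rw [hrep, foldl_hit]
  have hA := PySem.List.foldl_append_if
    (fun item => !(PySem.Str.isIn (patf item) st)) (id : String → String) input_items []
  simp only [List.map_id, List.nil_append, id] at hA
  rw [hA, List.map_map, zip_filter_map_fst]
  simp only [Function.comp_def, Bool.false_or]
  refine List.filter_congr ?_
  intro x _
  rw [any_range_eq_isIn]
  simp [PySem.Str.isIn_eq]

-- ===== VERDICT (by name: the statement is the Claim_ definition above) =====
theorem validate_all_items_addressed_spec : Claim_equal_validate_all_items_addressed := by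
  unfold Claim_equal_validate_all_items_addressed
  intro input_items output_text case_sensitive _
  unfold Spec_validate_all_items_addressed
  unfold validate_all_items_addressed validate_all_items_addressed_alt
  cases case_sensitive with
  | false =>
    simp only [Bool.false_eq_true, if_false, PySem.Str.len_eq]
    rw [missing_core input_items (PySem.Str.lower output_text) PySem.Str.lower]
  | true =>
    simp only [if_true, PySem.Str.len_eq]
    have h := missing_core input_items output_text id
    simp only [List.map_id, id] at h
    rw [h]
    rfl
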